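-- pv_equiv track=rewrite | github.com/qc-tum/qib | tests/test_operator.py | fermi_annihil_sign
-- ===== SOURCE A (Python) =====
-- def fermi_annihil_sign(n, a):
--     """
--     Sign factor of annihilating modes encoded in `a` as 1-bits
--     applied to state with occupied modes represented by `n`.
--     """
--     if n & a == a:
--         na = n - a
--         counter = 0
--         while a:
--             # current least significant bit
--             lsb = (a & -a)
--             counter += (na & (lsb - 1)).bit_count()
--             a -= lsb
--         return 1 - 2*(counter % 2)
--     else:
--         # applying annihilation operator yields zero
--         return 0
-- ===== SOURCE B (Python) =====
-- def fermi_annihil_sign(n, a):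
--     """
--     Sign factor of annihilating modes encoded in `a` as 1-bits
--     applied to state with occupied modes represented by `n`.
--     """
--     if n & a != a:
--         # applying annihilation operator yields zero
--         return 0
--     na = n - a
--     counter = 0
--     nb = 0  # number of set bits of na strictly below the current position
--     while a:
--         if a & 1:
--             counter += nb
--         if na & 1:
--             nb += 1
--         a >>= 1
--         na >>= 1
--     return 1 - 2 * (counter % 2)
-- ===== Notes on version B (the rewrite author's own statement) =====
-- stated objective: alternative
-- what changed: Replaces the per-set-bit lsb extraction with a masked bit_count per iteration by a single low-to-high bit scan that maintains a running count of remaining-occupation bits seen so far.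
import Mathlib
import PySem

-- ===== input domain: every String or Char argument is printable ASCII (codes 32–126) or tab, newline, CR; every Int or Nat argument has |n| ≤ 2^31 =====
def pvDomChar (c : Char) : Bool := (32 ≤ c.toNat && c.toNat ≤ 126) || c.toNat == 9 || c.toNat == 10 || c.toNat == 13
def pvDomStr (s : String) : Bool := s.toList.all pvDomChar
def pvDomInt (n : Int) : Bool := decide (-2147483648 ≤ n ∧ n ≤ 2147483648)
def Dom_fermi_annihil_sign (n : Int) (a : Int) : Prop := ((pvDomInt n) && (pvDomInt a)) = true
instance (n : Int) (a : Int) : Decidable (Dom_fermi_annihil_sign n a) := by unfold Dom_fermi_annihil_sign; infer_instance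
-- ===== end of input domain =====

-- B replaces A's per-set-bit lsb extraction + masked bit_count by one low-to-high bit
-- scan with a running count of remaining-occupation bits (objective: alternative algorithm).

-- ===== PORT A =====

-- `k &&& (k-1)` clears the lowest set bit, so it is strictly below k (termination of A's loop).
theorem pvNat_and_pred_lt (k : Nat) (h : 0 < k) : k &&& (k - 1) < k := by
  calc k &&& (k-1) ≤ k - 1 := by
        have := Nat.and_le_right (n := k) (m := k - 1); omega
    _ < k := by omega

-- Python's `a & -a` for a = ↑m > 0 in PySem's two's-complement encoding.
theorem pv_band_neg_self (m : Nat) (h : 0 < m) :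
    PySem.Int.band (↑m) (-(↑m : Int)) = ↑(m - (m &&& (m - 1))) := by
  unfold PySem.Int.band
  rw [if_pos (by positivity), if_neg (by omega)]
  congr 1
  have h1 : ((m : Int)).toNat = m := by omega
  have h2 : (-(-(m : Int)) - 1).toNat = m - 1 := by omega
  rw [h1, h2]

-- while a: lsb = a & -a; counter += (na & (lsb-1)).bit_count(); a -= lsb
def fermiA_loop (a na counter : Int) : Int :=
  if h : 0 < a then
    let lsb := PySem.Int.band a (-a)
    fermiA_loop (a - lsb) na
      (counter + ↑(PySem.Int.bitCount (PySem.Int.band na (lsb - 1))))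
  else counter
termination_by a.toNat
decreasing_by
  have hm : a = ↑a.toNat := by omega
  rw [hm, pv_band_neg_self a.toNat (by omega)]
  have hle : a.toNat &&& (a.toNat - 1) ≤ a.toNat := Nat.and_le_left
  have hlt := pvNat_and_pred_lt a.toNat (by omega)
  omega

def fermi_annihil_sign (n : Int) (a : Int) : Int :=
  if PySem.Int.band n a = a then
    1 - 2 * PySem.Int.mod (fermiA_loop a (n - a) 0) 2
  else
    0

-- ===== PORT B =====

-- while a: if a & 1: counter += nb; if na & 1: nb += 1; a >>= 1; na >>= 1
def fermiB_loop (a na nb counter : Int) : Int :=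
  if h : 0 < a then
    fermiB_loop (a >>> (1 : Nat)) (na >>> (1 : Nat))
      (if PySem.Int.band na 1 ≠ 0 then nb + 1 else nb)
      (if PySem.Int.band a 1 ≠ 0 then counter + nb else counter)
  else counter
termination_by a.toNat
decreasing_by
  have hm : a = ↑a.toNat := by omega
  have : (a >>> (1 : Nat)) = ((a.toNat >>> 1 : Nat) : Int) := by rw [hm]; rfl
  rw [this]
  have : a.toNat >>> 1 = a.toNat / 2 := Nat.shiftRight_one _
  omega

def fermi_annihil_sign_alt (n : Int) (a : Int) : Int :=
  if PySem.Int.band n a ≠ a then 0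
  else 1 - 2 * PySem.Int.mod (fermiB_loop a (n - a) 0 0) 2

-- ===== PRECONDITION & SPEC =====
-- Pre_ excludes exactly the inputs where a < 0 yet n & a == a: there A's `while a:` loop
-- never reaches 0 (Python A diverges; B diverges there too), so A returns on all of Pre_.
def Pre_fermi_annihil_sign (n : Int) (a : Int) : Prop :=
  PySem.Int.band n a = a → 0 ≤ a
instance (n : Int) (a : Int) : Decidable (Pre_fermi_annihil_sign n a) := by
  unfold Pre_fermi_annihil_sign; infer_instance

def pvWitness_fermi_annihil_sign : Int × Int := (5, 1)

def Spec_fermi_annihil_sign (n : Int) (a : Int) (out : Int) : Prop := out = fermi_annihil_sign_alt n a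
instance (n : Int) (a : Int) (out : Int) : Decidable (Spec_fermi_annihil_sign n a out) := by unfold Spec_fermi_annihil_sign; infer_instance

-- ===== CLAIM (what is proved, stated in full; the proofs are below) =====
def Claim_equal_fermi_annihil_sign : Prop := ∀ (n : Int) (a : Int), Dom_fermi_annihil_sign n a → Pre_fermi_annihil_sign n a → Spec_fermi_annihil_sign n a (fermi_annihil_sign n a)

-- ===== LEMMAS AND PROOFS =====

-- bit-level splitting of Nat &&&
theorem pv_and_bit (a b u v : Nat) (hu : u ≤ 1) (hv : v ≤ 1) :
    (2*a + u) &&& (2*b + v) = 2*(a &&& b) + u*v := by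
  apply Nat.eq_of_testBit_eq
  intro i
  rw [Nat.testBit_and]
  cases i with
  | zero =>
      rw [Nat.testBit_zero, Nat.testBit_zero, Nat.testBit_zero]
      have h1 : (2*a+u) % 2 = u := by omega
      have h2 : (2*b+v) % 2 = v := by omega
      have h3 : (2*(a &&& b) + u*v) % 2 = u*v := by
        interval_cases u <;> interval_cases v <;> omega
      rw [h1, h2, h3]
      interval_cases u <;> interval_cases v <;> simp
  | succ i =>
      rw [Nat.testBit_succ, Nat.testBit_succ, Nat.testBit_succ]
      have h1 : (2*a+u) / 2 = a := by omega
      have h2 : (2*b+v) / 2 = b := by omega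
      have h3 : (2*(a &&& b) + u*v) / 2 = a &&& b := by
        interval_cases u <;> interval_cases v <;> omega
      rw [h1, h2, h3, Nat.testBit_and]

theorem pv_and_odd (j : Nat) : (2*j + 1) &&& (2*j) = 2*j := by
  have := pv_and_bit j j 1 0 (by omega) (by omega)
  simpa [Nat.and_self] using this

theorem pv_and_even (k : Nat) (h : 0 < k) : (2*k) &&& (2*k - 1) = 2*(k &&& (k-1)) := by
  have h1 : 2*k - 1 = 2*(k-1) + 1 := by omega
  have := pv_and_bit k (k-1) 0 1 (by omega) (by omega)
  rw [h1]; simpa using this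

-- popcount (Python bit_count on a Nat) halving
theorem pv_pop2 (x u : Nat) (hu : u ≤ 1) :
    PySem.Int.bitCount ↑(2*x + u) = u + PySem.Int.bitCount ↑x := by
  by_cases hx : 2*x + u = 0
  · have : x = 0 ∧ u = 0 := by omega
    rw [this.1, this.2]; simp
  · rw [PySem.Int.bitCount_natCast (by omega)]
    have h1 : (2*x+u) % 2 = u := by omega
    have h2 : (2*x+u) / 2 = x := by omega
    rw [h1, h2]

-- clearing the lowest set bit removes exactly one set bit
theorem pv_pop_pred (k : Nat) (h : 0 < k) :
    PySem.Int.bitCount ↑(k &&& (k-1)) + 1 = PySem.Int.bitCount (↑k : Int) := by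
  induction k using Nat.strong_induction_on with
  | _ k ih =>
    rcases Nat.even_or_odd k with ⟨j, hj⟩ | ⟨j, hj⟩
    · -- k = 2*j, j > 0
      have hj' : 0 < j := by omega
      have hk : k = 2*j := by omega
      rw [hk, pv_and_even j hj']
      have e1 := pv_pop2 (j &&& (j-1)) 0 (by omega)
      have e2 := pv_pop2 j 0 (by omega)
      have e3 := ih j (by omega) hj'
      simp only [Nat.add_zero] at e1 e2
      omega
    · -- k = 2*j + 1
      have hk : k = 2*j + 1 := by omega
      have hk1 : k - 1 = 2*j := by omega
      rw [hk]
      have : (2*j+1) &&& (2*j+1-1) = 2*j := by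
        have := pv_and_odd j; simpa using this
      rw [this]
      have e1 := pv_pop2 j 0 (by omega)
      have e2 := pv_pop2 j 1 (by omega)
      simp only [Nat.add_zero] at e1
      omega

-- casted shift
theorem pv_shift_natCast (m : Nat) : ((m : Int) >>> (1 : Nat)) = ((m / 2 : Nat) : Int) := by
  have : (m : Int) >>> (1 : Nat) = ((m >>> 1 : Nat) : Int) := rfl
  rw [this, Nat.shiftRight_one]

theorem pv_mod_natCast (m : Nat) : PySem.Int.mod (↑m) 2 = ((m % 2 : Nat) : Int) := by
  simp [pysem]

theorem pv_mod2_cases (na : Int) : PySem.Int.mod na 2 = 0 ∨ PySem.Int.mod na 2 = 1 := by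
  simp [pysem]
  omega

-- mask split: bit_count(na & (2m+1)) = (na & 1) + bit_count((na >> 1) & m), any na
theorem pv_mask_split (na : Int) (m : Nat) :
    (PySem.Int.bitCount (PySem.Int.band na ↑(2*m + 1)) : Int)
      = PySem.Int.mod na 2 + ↑(PySem.Int.bitCount (PySem.Int.band (na >>> (1 : Nat)) ↑m)) := by
  cases na with
  | ofNat p =>
      have hsh : (Int.ofNat p) >>> (1 : Nat) = ((p / 2 : Nat) : Int) := pv_shift_natCast p
      rw [hsh]
      have hb1 : PySem.Int.band (Int.ofNat p) ↑(2*m+1) = ↑(p &&& (2*m+1)) := PySem.Int.band_natCast p (2*m+1)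
      have hb2 : PySem.Int.band ((p/2 : Nat) : Int) ↑m = ↑((p/2) &&& m) := PySem.Int.band_natCast (p/2) m
      rw [hb1, hb2]
      have hsplit : p &&& (2*m+1) = 2*((p/2) &&& m) + (p % 2) * 1 := by
        have := pv_and_bit (p/2) m (p % 2) 1 (by omega) (by omega)
        rw [← this]; congr 1 <;> omega
      rw [hsplit]
      rw [pv_pop2 ((p/2) &&& m) ((p % 2) * 1) (by omega)]
      have : PySem.Int.mod (Int.ofNat p) 2 = ((p % 2 : Nat) : Int) := pv_mod_natCast p
      rw [this]; push_cast; ring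
  | negSucc q =>
      have hsh : (Int.negSucc q) >>> (1 : Nat) = Int.negSucc (q / 2) := by
        have : (Int.negSucc q) >>> (1 : Nat) = Int.negSucc (q >>> 1) := rfl
        rw [this, Nat.shiftRight_one]
      rw [hsh]
      have hb1 : PySem.Int.band (Int.negSucc q) ↑(2*m+1)
          = ↑((2*m+1) - ((2*m+1) &&& q)) := by
        unfold PySem.Int.band
        rw [if_neg (by omega), if_pos (by positivity)]
        congr 1
        have h1 : ((2*m+1 : Nat) : Int).toNat = 2*m+1 := by omega
        have h2 : (-(Int.negSucc q) - 1).toNat = q := by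
          simp [Int.negSucc_eq]
        rw [h1, h2]
      have hb2 : PySem.Int.band (Int.negSucc (q/2)) ↑m = ↑(m - (m &&& (q/2))) := by
        unfold PySem.Int.band
        rw [if_neg (by omega), if_pos (by positivity)]
        congr 1
        have h1 : ((m : Nat) : Int).toNat = m := by omega
        have h2 : (-(Int.negSucc (q/2)) - 1).toNat = q/2 := by
          simp [Int.negSucc_eq]; omega
        rw [h1, h2]
      rw [hb1, hb2]
      have hand : (2*m+1) &&& q = 2*(m &&& (q/2)) + 1*(q % 2) := by
        have := pv_and_bit m (q/2) 1 (q % 2) (by omega) (by omega)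
        rw [← this]; congr 1 <;> omega
      have hle : m &&& (q/2) ≤ m := Nat.and_le_left
      have harg : (2*m+1) - ((2*m+1) &&& q) = 2*(m - (m &&& (q/2))) + (1 - q % 2) := by
        rw [hand]; omega
      rw [harg, pv_pop2 (m - (m &&& (q/2))) (1 - q % 2) (by omega)]
      have hmod : PySem.Int.mod (Int.negSucc q) 2 = ((1 - q % 2 : Nat) : Int) := by
        simp [pysem, Int.negSucc_eq]; omega
      rw [hmod]; push_cast; omega

-- base and step unfoldings of the two loops
theorem pv_A_zero (na c : Int) : fermiA_loop 0 na c = c := by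
  rw [fermiA_loop]; rw [dif_neg (by omega)]

theorem pv_A_step (m : Nat) (hm : 0 < m) (na c : Int) :
    fermiA_loop ↑m na c
      = fermiA_loop ((m &&& (m-1) : Nat) : Int) na
          (c + ↑(PySem.Int.bitCount (PySem.Int.band na (((m - (m &&& (m-1)) : Nat) : Int) - 1)))) := by
  rw [fermiA_loop]
  rw [dif_pos (show (0:Int) < ↑m by exact_mod_cast hm)]
  simp only
  rw [pv_band_neg_self m hm]
  have hle : m &&& (m-1) ≤ m := Nat.and_le_left
  have harg : (↑m : Int) - ↑(m - (m &&& (m-1))) = ((m &&& (m-1) : Nat) : Int) := by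
    push_cast [hle]; ring
  rw [harg]

theorem pv_B_zero (na nb c : Int) : fermiB_loop 0 na nb c = c := by
  rw [fermiB_loop]; rw [dif_neg (by omega)]

theorem pv_B_step (m : Nat) (hm : 0 < m) (na nb c : Int) :
    fermiB_loop ↑m na nb c
      = fermiB_loop ((m / 2 : Nat) : Int) (na >>> (1 : Nat))
          (if PySem.Int.mod na 2 ≠ 0 then nb + 1 else nb)
          (if ((m % 2 : Nat) : Int) ≠ 0 then c + nb else c) := by
  rw [fermiB_loop]
  rw [dif_pos (show (0:Int) < ↑m by exact_mod_cast hm)]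
  rw [pv_shift_natCast m, PySem.Int.band_one, PySem.Int.band_one, pv_mod_natCast m]

-- one full bit-position step of A's loop (peels bit 0 of a and of na)
theorem pv_A_peel (m : Nat) : 0 < m → ∀ (na c : Int),
    fermiA_loop ↑m na c
      = fermiA_loop ((m / 2 : Nat) : Int) (na >>> (1 : Nat))
          (c + PySem.Int.mod na 2 * ↑(PySem.Int.bitCount ((m / 2 : Nat) : Int))) := by
  induction m using Nat.strong_induction_on with
  | _ m ih =>
    intro hm na c
    rcases Nat.even_or_odd m with ⟨k, hk⟩ | ⟨j, hj⟩
    · -- m = 2*k with k > 0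
      have hm2 : m = 2*k := by omega
      have hk0 : 0 < k := by omega
      subst hm2
      obtain ⟨w, hw⟩ : ∃ w, k &&& (k-1) = w := ⟨_, rfl⟩
      have hwlt : w < k := hw ▸ pvNat_and_pred_lt k hk0
      have hand : 2*k &&& (2*k - 1) = 2*w := by rw [pv_and_even k hk0, hw]
      have hpop : PySem.Int.bitCount ((w : Nat) : Int) + 1 = PySem.Int.bitCount ((k : Nat) : Int) := by
        rw [← hw]; exact pv_pop_pred k hk0
      rw [pv_A_step (2*k) (by omega) na c, hand]
      have hmask : (((2*k - 2*w : Nat)) : Int) - 1 = ((2*((k - w) - 1) + 1 : Nat) : Int) := by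
        push_cast; omega
      rw [hmask]
      have hdiv : 2*k/2 = k := by omega
      rw [hdiv, pv_A_step k hk0, hw]
      have hmask2 : (((k - w : Nat)) : Int) - 1 = (((k - w) - 1 : Nat) : Int) := by
        push_cast; omega
      rw [hmask2]
      have hsplit := pv_mask_split na ((k - w) - 1)
      by_cases hw0 : w = 0
      · -- the lowest set bit was the only one: both loops stop next
        subst hw0
        have hbck : PySem.Int.bitCount ((k : Nat) : Int) = 1 := by
          rw [← hpop]; norm_num
        rw [show ((2*0 : Nat) : Int) = 0 from by norm_num]
        rw [pv_A_zero, pv_A_zero, hsplit, hbck]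
        push_cast
        ring
      · have hw0' : 0 < w := by omega
        rw [ih (2*w) (by omega) (by omega) na _]
        have hdivw : (2*w)/2 = w := by omega
        rw [hdivw]
        congr 1
        rw [hsplit]
        have hp : (PySem.Int.bitCount ((k : Nat) : Int) : Int)
            = (PySem.Int.bitCount ((w : Nat) : Int) : Int) + 1 := by exact_mod_cast hpop.symm
        rw [hp]
        ring
    · -- m = 2*j + 1
      subst hj
      rw [pv_A_step (2*j+1) (by omega) na c]
      have hand : (2*j+1) &&& (2*j+1-1) = 2*j := by
        have := pv_and_odd j; simpa using this
      rw [hand]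
      have hmask : (((2*j+1 - 2*j : Nat)) : Int) - 1 = 0 := by
        have : (2*j+1 - 2*j : Nat) = 1 := by omega
        rw [this]; norm_num
      rw [hmask]
      simp only [PySem.Int.band_zero, PySem.Int.bitCount_zero, Nat.cast_zero, add_zero]
      have hdiv : (2*j+1)/2 = j := by omega
      rw [hdiv]
      by_cases hj0 : j = 0
      · rw [hj0]
        simp [pv_A_zero]
      · rw [ih (2*j) (by omega) (by omega) na c]
        have hdivj : 2*j/2 = j := by omega
        rw [hdivj]

-- the nb accumulator of B's loop contributes nb * popcount(a) to the final counter
theorem pv_B_shift (m : Nat) : ∀ (na nb c : Int),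
    fermiB_loop ↑m na nb c = fermiB_loop ↑m na 0 (c + nb * ↑(PySem.Int.bitCount (↑m : Int))) := by
  induction m using Nat.strong_induction_on with
  | _ m ih =>
    intro na nb c
    by_cases hm : m = 0
    · subst hm
      have h0 : ((0 : Nat) : Int) = 0 := by norm_num
      rw [h0, pv_B_zero, pv_B_zero]
      simp
    · have hm0 : 0 < m := by omega
      have hbc : PySem.Int.bitCount ((m : Nat) : Int) = m % 2 + PySem.Int.bitCount ((m/2 : Nat) : Int) :=
        PySem.Int.bitCount_natCast hm0
      have hihL := ih (m/2) (by omega) (na >>> (1:Nat))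
        (if PySem.Int.mod na 2 ≠ 0 then nb + 1 else nb)
        (if ((m % 2 : Nat) : Int) ≠ 0 then c + nb else c)
      have hihR := ih (m/2) (by omega) (na >>> (1:Nat))
        (if PySem.Int.mod na 2 ≠ 0 then (0:Int) + 1 else 0)
        (if ((m % 2 : Nat) : Int) ≠ 0
          then (c + nb * ↑(PySem.Int.bitCount ((m:Nat):Int))) + 0
          else c + nb * ↑(PySem.Int.bitCount ((m:Nat):Int)))
      rw [pv_B_step m hm0 na nb c,
          pv_B_step m hm0 na 0 (c + nb * ↑(PySem.Int.bitCount ((m:Nat):Int))),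
          hihL, hihR]
      congr 1
      rw [hbc]
      have h := pv_mod2_cases na
      rcases h with h | h <;>
        rcases Nat.mod_two_eq_zero_or_one m with h2 | h2 <;>
        simp [pysem] at h <;>
        (simp [h, h2] <;> push_cast <;> ring)

-- the two loops agree
theorem pv_loops_eq (m : Nat) : ∀ (na c : Int),
    fermiA_loop ↑m na c = fermiB_loop ↑m na 0 c := by
  induction m using Nat.strong_induction_on with
  | _ m ih =>
    intro na c
    by_cases hm : m = 0
    · subst hm
      have h0 : ((0 : Nat) : Int) = 0 := by norm_num
      rw [h0, pv_A_zero, pv_B_zero]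
    · have hm0 : 0 < m := by omega
      have hstep := pv_B_step m hm0 na 0 c
      have hshift := pv_B_shift (m/2) (na >>> (1 : Nat))
        (if PySem.Int.mod na 2 ≠ 0 then (0:Int) + 1 else (0:Int))
        (if ((m % 2 : Nat) : Int) ≠ 0 then c + 0 else c)
      rw [pv_A_peel m hm0 na c, ih (m/2) (by omega), hstep, hshift]
      congr 1
      rcases pv_mod2_cases na with h | h <;> simp [pysem] at h <;> simp [pysem, h]

-- ===== VERDICT (by name: the statement is the Claim_ definition above) =====
theorem fermi_annihil_sign_spec : Claim_equal_fermi_annihil_sign := by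
  intro n a _ hpre
  unfold Spec_fermi_annihil_sign fermi_annihil_sign fermi_annihil_sign_alt
  by_cases h : PySem.Int.band n a = a
  · have ha : 0 ≤ a := hpre h
    rw [if_pos h, if_neg (by simpa using h)]
    have hm : a = ((a.toNat : Nat) : Int) := by omega
    rw [hm, pv_loops_eq a.toNat (n - (a.toNat : Int)) 0]
  · rw [if_neg h, if_pos (by simpa using h)]
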